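-- pv_equiv track=rewrite | github.com/lubranoa/CS362-Portfolio-Project | task.py | conv_endian
-- ===== SOURCE A (Python) =====
-- import string
--
-- def conv_endian(num, endian='big'):
--     """Converts an integer from base 10 to a hexadecimal string in
--     either big or little endian byte order. Returns None if value for
--     endian is incorrect.
--
--     :param int num: A negative or positive integer
--     :param str endian: A byte order, 'big' or 'little', defaults to 'big'
--     :return: The converted hex number string in specified byte order
--     :rtype: string or None
--     """
--     hex_str = string.digits + string.ascii_uppercase[0:6]  # '0123456789ABCDEF'
--     char_stack = []
--
--     if endian != 'big':
--         return None
--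
--     out_str = '' if num >= 0 else '-'
--     num = abs(num)
--
--     # Get hex digit chars and append to char_stack
--     if num == 0:
--         char_stack.append(hex_str[num])
--     while num != 0:
--         modulo = num % 16
--         char_stack.append(hex_str[modulo])
--         num //= 16
--
--     # Construct string
--     if len(char_stack) % 2 != 0:
--         out_str += '0'
--     while len(char_stack) != 0:
--         out_str += char_stack.pop()
--         # Insert space between each pair of hex digits, unless none left
--         if len(char_stack) > 0 and len(char_stack) % 2 == 0:
--             out_str += ' '
--
--     return out_str
-- ===== SOURCE B (Python) =====
-- def conv_endian(num, endian='big'):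
--     if endian != 'big':
--         return None
--     digits = format(abs(num), 'X')
--     if len(digits) % 2 == 1:
--         digits = '0' + digits
--     pairs = [digits[i:i+2] for i in range(0, len(digits), 2)]
--     sign = '-' if num < 0 else ''
--     return sign + ' '.join(pairs)
-- ===== Notes on version B (the rewrite author's own statement) =====
-- stated objective: idiomatic
-- what changed: Replaces A's repeated-division char stack plus a manual pop loop with parity-tracked space insertion by computing the whole hex string at once with format(abs(num),'X'), zero-padding to even length, and joining two-character slices with ' '.join.
import Mathlib
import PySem

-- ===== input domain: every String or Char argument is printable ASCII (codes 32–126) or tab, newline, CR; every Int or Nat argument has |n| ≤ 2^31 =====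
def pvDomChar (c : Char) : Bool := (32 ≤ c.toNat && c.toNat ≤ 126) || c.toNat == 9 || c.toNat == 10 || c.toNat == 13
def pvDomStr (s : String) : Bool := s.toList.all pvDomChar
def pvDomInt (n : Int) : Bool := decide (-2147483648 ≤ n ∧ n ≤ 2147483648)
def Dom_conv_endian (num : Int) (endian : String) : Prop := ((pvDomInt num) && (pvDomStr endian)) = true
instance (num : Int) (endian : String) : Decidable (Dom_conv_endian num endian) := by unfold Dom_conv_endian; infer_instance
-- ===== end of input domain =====

-- B replaces A's repeated-division char stack and manual pop/space loop by computing the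
-- hex digit string in one shot, padding to even length and joining two-char slices (idiomatic).


-- ===== PORT A =====
-- hex_str = string.digits + string.ascii_uppercase[0:6]
def pvHexStr : List Char := "0123456789ABCDEF".toList

-- A's while loop: push hex_str[num % 16], num //= 16  (num is nonneg after abs)
def pvStackLoop (n : Nat) (st : List Char) : List Char :=
  if _h : n = 0 then st
  else pvStackLoop (n / 16) (st ++ [pvHexStr.getD (n % 16) '0'])
termination_by n
decreasing_by exact Nat.div_lt_self (Nat.pos_of_ne_zero _h) (by omega)

-- A's second while loop: pop from the end, append to out, insert ' ' when the
-- remaining stack is nonempty with even length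
def pvPopLoop (st out : List Char) : List Char :=
  if h : st = [] then out
  else
    let c := st.getLast h
    let st' := st.dropLast
    let out' := out ++ [c]
    if 0 < st'.length ∧ st'.length % 2 = 0 then pvPopLoop st' (out' ++ [' ']) else pvPopLoop st' out'
termination_by st.length
decreasing_by all_goals { simp only [List.length_dropLast]; have h2 : st ≠ [] := h; have h3 : 0 < st.length := List.length_pos_iff.mpr h2; omega }

def conv_endian (num : Int) (endian : String) : Option String :=
  if endian ≠ "big" then none
  else
    let out0 : List Char := if num ≥ 0 then [] else ['-']
    let n : Nat := num.natAbs
    let st0 : List Char := if n = 0 then [pvHexStr.getD n '0'] else []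
    let stack := pvStackLoop n st0
    let out1 := if stack.length % 2 ≠ 0 then out0 ++ ['0'] else out0
    some (String.ofList (pvPopLoop stack out1))

-- ===== PORT B =====
-- format(n, 'X'): big-endian uppercase hex digits of a nonnegative integer
def pvFmtHex (n : Nat) : List Char :=
  if _h : n < 16 then [pvHexStr.getD n '0']
  else pvFmtHex (n / 16) ++ [pvHexStr.getD (n % 16) '0']
termination_by n
decreasing_by exact Nat.div_lt_self (by omega) (by omega)

def conv_endian_alt (num : Int) (endian : String) : Option String :=
  if endian ≠ "big" then none
  else
    let ds0 := pvFmtHex num.natAbs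
    let ds := if ds0.length % 2 = 1 then '0' :: ds0 else ds0
    let pairs := (PySem.List.pyRange 0 ds.length 2).map
      (fun i => PySem.List.slice ds (some i) (some (i + 2)))
    let sign : List Char := if num < 0 then ['-'] else []
    some (String.ofList (sign ++ PySem.Chars.join [' '] pairs))

-- ===== PRECONDITION & SPEC =====
def Spec_conv_endian (num : Int) (endian : String) (out : Option String) : Prop := out = conv_endian_alt num endian
instance (num : Int) (endian : String) (out : Option String) : Decidable (Spec_conv_endian num endian out) := by unfold Spec_conv_endian; infer_instance

-- ===== CLAIM (what is proved, stated in full; the proofs are below) =====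
def Claim_equal_conv_endian : Prop := ∀ (num : Int) (endian : String), Dom_conv_endian num endian → Spec_conv_endian num endian (conv_endian num endian)

-- ===== LEMMAS AND PROOFS =====

-- big-endian digit list with A's space-insertion rule applied
def pvSpaced : List Char → List Char
  | [] => []
  | a :: t => if t = [] then [a] else if t.length % 2 = 0 then a :: ' ' :: pvSpaced t else a :: pvSpaced t

-- consecutive pairs of an even-length list
def pvChunks : List Char → List (List Char)
  | [] => []
  | [a] => [[a]]
  | a :: b :: t => [a, b] :: pvChunks t

theorem pvFmtHex_ne_nil (n : Nat) : pvFmtHex n ≠ [] := by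
  unfold pvFmtHex
  split <;> simp

theorem pvStackLoop_eq (n : Nat) (st : List Char) (hn : n ≠ 0) :
    pvStackLoop n st = st ++ (pvFmtHex n).reverse := by
  induction n using Nat.strong_induction_on generalizing st with
  | _ n ih =>
    rw [pvStackLoop]
    simp only [hn, dite_false]
    by_cases h16 : n < 16
    · have h0 : n / 16 = 0 := Nat.div_eq_of_lt h16
      rw [h0, pvStackLoop]
      simp [pvFmtHex, h16, Nat.mod_eq_of_lt h16]
    · have hd : n / 16 ≠ 0 := by omega
      rw [ih (n / 16) (Nat.div_lt_self (Nat.pos_of_ne_zero hn) (by omega)) _ hd]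
      conv_rhs => rw [pvFmtHex]
      simp [h16]

theorem pvStack_full (n : Nat) :
    pvStackLoop n (if n = 0 then [pvHexStr.getD n '0'] else []) = (pvFmtHex n).reverse := by
  by_cases h0 : n = 0
  · subst h0
    rw [if_pos rfl, pvStackLoop]
    simp [pvFmtHex]
  · rw [if_neg h0, pvStackLoop_eq n [] h0]
    simp

theorem pvPopLoop_rev (l : List Char) (out : List Char) :
    pvPopLoop l.reverse out = out ++ pvSpaced l := by
  induction l generalizing out with
  | nil => rw [pvPopLoop]; simp [pvSpaced]
  | cons a t ih =>
    rw [List.reverse_cons, pvPopLoop]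
    have hne : t.reverse ++ [a] ≠ [] := by simp
    simp only [hne, dite_false]
    rw [List.getLast_concat, List.dropLast_concat]
    by_cases ht : t = []
    · subst ht
      simp [pvPopLoop, pvSpaced]
    · by_cases hev : t.length % 2 = 0
      · have hc : 0 < t.reverse.length ∧ t.reverse.length % 2 = 0 := by
          simp [List.length_reverse, hev, List.length_pos_iff, ht]
        rw [if_pos hc, ih]
        simp [pvSpaced, ht, hev]
      · have hc : ¬ (0 < t.reverse.length ∧ t.reverse.length % 2 = 0) := by
          simp [List.length_reverse, hev]
        rw [if_neg hc, ih]
        simp [pvSpaced, ht, hev]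

theorem pvJoin_cons_cons (s x y : List Char) (r : List (List Char)) :
    PySem.Chars.join s (x :: y :: r) = x ++ s ++ PySem.Chars.join s (y :: r) := by
  simp [PySem.Chars.join, List.intercalate, List.intersperse, List.append_assoc]

theorem pvSpaced_cons_cons (a b : Char) (t : List Char) (ht : t ≠ []) (hev : t.length % 2 = 0) :
    pvSpaced (a :: b :: t) = a :: b :: ' ' :: pvSpaced t := by
  have h1 : (t.length + 1) % 2 = 1 := by omega
  simp [pvSpaced, ht, h1, hev]

theorem pvChunks_ne_nil (l : List Char) (h : l ≠ []) : pvChunks l ≠ [] := by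
  match l with
  | [a] => simp [pvChunks]
  | a :: b :: t => simp [pvChunks]

theorem pvJoin_cons_of_ne (s x : List Char) (r : List (List Char)) (hr : r ≠ []) :
    PySem.Chars.join s (x :: r) = x ++ s ++ PySem.Chars.join s r := by
  cases r with
  | nil => exact absurd rfl hr
  | cons y r' => exact pvJoin_cons_cons s x y r'

theorem pvSpaced_eq_join (l : List Char) (h : l.length % 2 = 0) :
    pvSpaced l = PySem.Chars.join [' '] (pvChunks l) := by
  match l with
  | [] => simp [pvSpaced, pvChunks, PySem.Chars.join, List.intercalate]
  | [a] => simp at h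
  | a :: b :: [] =>
    simp [pvSpaced, pvChunks, PySem.Chars.join, List.intercalate]
  | a :: b :: c :: t' =>
    have ht : (c :: t').length % 2 = 0 := by
      simp only [List.length_cons] at h ⊢; omega
    have iht := pvSpaced_eq_join (c :: t') ht
    rw [pvSpaced_cons_cons a b (c :: t') (by simp) ht, pvChunks,
        pvJoin_cons_of_ne [' '] [a, b] _ (pvChunks_ne_nil (c :: t') (by simp)), ← iht]
    simp
termination_by l.length
decreasing_by simp only [List.length_cons]; omega

theorem pvChunks_drop (m : Nat) (l : List Char) (h : l.length = 2 * m) :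
    (List.range m).map (fun k => (l.drop (2 * k)).take 2) = pvChunks l := by
  induction m generalizing l with
  | zero =>
    have hl : l = [] := by
      cases l with
      | nil => rfl
      | cons a t => simp at h
    subst hl; simp [pvChunks]
  | succ m ih =>
    match l with
    | [] => simp at h
    | [a] => simp at h; omega
    | a :: b :: t =>
      have ht : t.length = 2 * m := by
        simp only [List.length_cons] at h; omega
      rw [List.range_succ_eq_map]
      simp only [List.map_cons, List.map_map]
      have h1 : ((a :: b :: t).drop (2 * 0)).take 2 = [a, b] := rfl
      rw [h1, pvChunks, ← ih t ht]
      congr 1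

theorem pvPairs_eq_chunks (l : List Char) (h : l.length % 2 = 0) :
    (PySem.List.pyRange 0 l.length 2).map
      (fun i => PySem.List.slice l (some i) (some (i + 2))) = pvChunks l := by
  obtain ⟨m, hm⟩ : ∃ m, l.length = 2 * m := ⟨l.length / 2, by omega⟩
  rw [PySem.List.pyRange_of_pos 0 (l.length) (by norm_num), List.map_map]
  have hcount : (if (0:Int) < l.length then (((l.length : Int) - 0 + 2 - 1) / 2).toNat else 0) = m := by
    split <;> omega
  rw [hcount, ← pvChunks_drop m l hm]
  apply List.map_congr_left
  intro k _
  simp only [Function.comp_apply]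
  have h0 : (0 : Int) + 2 * (k : Int) = ((2 * k : Nat) : Int) := by push_cast; ring
  rw [h0]
  have h2 : ((2 * k : Nat) : Int) + 2 = ((2 * k : Nat) : Int) + ((2 : Nat) : Int) := by norm_num
  rw [h2, PySem.List.slice_natCast_add]

theorem pvSpaced_pad (l : List Char) (hne : l ≠ []) (hodd : l.length % 2 = 1) :
    pvSpaced ('0' :: l) = '0' :: pvSpaced l := by
  have h1 : ¬ (l.length % 2 = 0) := by omega
  simp [pvSpaced, hne, h1]

-- ===== VERDICT (by name: the statement is the Claim_ definition above) =====
theorem conv_endian_spec : Claim_equal_conv_endian := by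
  intro num endian _
  unfold Spec_conv_endian conv_endian conv_endian_alt
  by_cases he : endian = "big"
  · subst he
    simp only [ne_eq, not_true_eq_false, if_false, ite_not]
    rw [pvStack_full num.natAbs]
    set D0 := pvFmtHex num.natAbs with hD0
    have hD0ne : D0 ≠ [] := pvFmtHex_ne_nil num.natAbs
    set DS : List Char := if D0.length % 2 = 1 then '0' :: D0 else D0 with hDS
    have hdslen : DS.length % 2 = 0 := by
      rw [hDS]; split
      · simp only [List.length_cons]; omega
      · omega
    rw [pvPopLoop_rev D0, pvPairs_eq_chunks DS hdslen, ← pvSpaced_eq_join DS hdslen]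
    simp only [List.length_reverse]
    by_cases hodd : D0.length % 2 = 1
    · have hpad : ¬ (D0.length % 2 = 0) := by omega
      rw [hDS, if_pos hodd, pvSpaced_pad D0 hD0ne hodd]
      by_cases hneg : num < 0
      · have hge : ¬ (num ≥ 0) := by omega
        simp [hge, hneg, hpad]
      · have hge : num ≥ 0 := by omega
        simp [hge, hneg, hpad]
    · have hev : D0.length % 2 = 0 := by omega
      rw [hDS, if_neg hodd]
      by_cases hneg : num < 0
      · have hge : ¬ (num ≥ 0) := by omega
        simp [hge, hneg, hev]
      · have hge : num ≥ 0 := by omega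
        simp [hge, hneg, hev]
  · simp [he]
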